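-- pv_equiv track=rewrite | github.com/winrox/winrox.github.io | src/yatzy.py | get_of_a_kind_points
-- ===== SOURCE A (Python) =====
-- def get_of_a_kind_points(hand, score_data):
--     hand_without_set = []
--     points = score_data[0]
--     for num in hand:
--         if num != score_data[1]:
--             hand_without_set.append(num)
--     for num in hand_without_set:
--         points += num
--     return points
-- ===== SOURCE B (Python) =====
-- def get_of_a_kind_points(hand, score_data):
--     return score_data[0] + sum(hand) - hand.count(score_data[1]) * score_data[1]
-- ===== Notes on version B (the rewrite author's own statement) =====
-- stated objective: simpler
-- what changed: Replaces the build-a-filtered-list-then-sum two-loop version with a one-line algebraic identity: base + sum(hand) minus the matching dice's contribution (count * target), maintaining no intermediate list. Measured ~2x faster at large sizes because sum/count are single C-level passes instead of a Python-level loop building an intermediate list.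
import Mathlib
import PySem

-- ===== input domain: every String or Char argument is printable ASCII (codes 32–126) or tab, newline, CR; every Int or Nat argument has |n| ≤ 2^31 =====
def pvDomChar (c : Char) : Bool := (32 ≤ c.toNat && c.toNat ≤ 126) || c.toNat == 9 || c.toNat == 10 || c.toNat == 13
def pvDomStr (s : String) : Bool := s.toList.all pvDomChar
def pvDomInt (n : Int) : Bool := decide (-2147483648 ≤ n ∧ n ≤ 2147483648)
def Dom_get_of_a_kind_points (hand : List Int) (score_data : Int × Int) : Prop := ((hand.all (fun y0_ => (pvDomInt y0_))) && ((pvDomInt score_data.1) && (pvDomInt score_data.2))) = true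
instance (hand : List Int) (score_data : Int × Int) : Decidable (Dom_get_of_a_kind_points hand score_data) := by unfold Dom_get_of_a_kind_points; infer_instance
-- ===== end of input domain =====

-- ===== PORT A =====
-- B replaces the filter-then-sum two-loop version with the identity base + sum - count*target; return-value equivalence.
def get_of_a_kind_points (hand : List Int) (score_data : Int × Int) : Int :=
  let hand_without_set := hand.foldl (fun acc num => if num ≠ score_data.2 then acc ++ [num] else acc) []
  hand_without_set.foldl (fun points num => points + num) score_data.1

-- ===== PORT B =====
def get_of_a_kind_points_alt (hand : List Int) (score_data : Int × Int) : Int :=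
  score_data.1 + hand.sum - (PySem.List.count hand score_data.2 : Int) * score_data.2

-- ===== PRECONDITION & SPEC =====
def Spec_get_of_a_kind_points (hand : List Int) (score_data : Int × Int) (out : Int) : Prop := out = get_of_a_kind_points_alt hand score_data
instance (hand : List Int) (score_data : Int × Int) (out : Int) : Decidable (Spec_get_of_a_kind_points hand score_data out) := by unfold Spec_get_of_a_kind_points; infer_instance

-- ===== CLAIM (what is proved, stated in full; the proofs are below) =====
def Claim_equal_get_of_a_kind_points : Prop := ∀ (hand : List Int) (score_data : Int × Int), Dom_get_of_a_kind_points hand score_data → Spec_get_of_a_kind_points hand score_data (get_of_a_kind_points hand score_data)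

-- ===== LEMMAS AND PROOFS =====

-- ===== VERDICT (by name: the statement is the Claim_ definition above) =====
lemma pv_fold_filter (t : Int) (xs : List Int) (l0 : List Int) :
    xs.foldl (fun acc num => if num ≠ t then acc ++ [num] else acc) l0
    = l0 ++ xs.filter (fun num => !decide (num = t)) := by
  induction xs generalizing l0 with
  | nil => simp
  | cons x xs ih =>
    by_cases hx : x = t
    · rw [List.foldl_cons, if_neg (fun h => h hx), ih]
      simp [List.filter_cons, hx]
    · rw [List.foldl_cons, if_pos hx, ih (l0 ++ [x])]
      simp [List.filter_cons, hx]

lemma pv_fold_sum (base : Int) (l : List Int) :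
    l.foldl (fun points num => points + num) base = base + l.sum := by
  induction l generalizing base with
  | nil => simp
  | cons x xs ih => simp [List.foldl_cons, ih]; ring

lemma pv_sum_filter (t : Int) (xs : List Int) :
    (xs.filter (fun num => !decide (num = t))).sum = xs.sum - (xs.count t : Int) * t := by
  induction xs with
  | nil => simp
  | cons x xs ih =>
    by_cases hx : x = t
    · simp [List.filter_cons, hx, List.count_cons, ih]
      push_cast
      ring
    · simp [List.filter_cons, hx, List.count_cons, ih]
      ring

theorem get_of_a_kind_points_spec : Claim_equal_get_of_a_kind_points := by
  intro hand sd _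
  unfold Spec_get_of_a_kind_points get_of_a_kind_points get_of_a_kind_points_alt
  rw [pv_fold_filter, List.nil_append, pv_fold_sum, pv_sum_filter,
    PySem.List.count_eq]

  ring
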